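-- pv_equiv track=rewrite | github.com/horia-bogdan/calcul-parlamentare | tally.py | find_independents
-- ===== SOURCE A (Python) =====
-- def find_independents(votes):
--     minus_counts = {}
--     initial_parties = list(votes[0])
--     for party in initial_parties:
--         minus_counts[party] = 0
--
--     for constituency in votes:
--         for party in initial_parties:
--             if constituency[party] < 0:
--                 minus_counts[party] += 1
--
--     independents = []
--     for party in initial_parties:
--         if minus_counts[party] == len(votes) - 1:
--             for i in range(0, len(votes)):
--                 if votes[i][party] >= 0:
--                     independents.append(party)
--
--     return independents
-- ===== SOURCE B (Python) =====
-- def find_independents(votes):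
--     n = len(votes)
--     independents = []
--     for party in list(votes[0]):
--         negatives = sum(1 for constituency in votes if constituency[party] < 0)
--         if negatives == n - 1:
--             independents.append(party)
--     return independents
-- ===== Notes on version B (the rewrite author's own statement) =====
-- stated objective: simpler
-- what changed: B does one pass per party counting its negative constituencies directly and appends it iff the count is len(votes)-1, eliminating A's shared minus_counts dict and its redundant final re-scan over all constituencies.
import Mathlib
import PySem

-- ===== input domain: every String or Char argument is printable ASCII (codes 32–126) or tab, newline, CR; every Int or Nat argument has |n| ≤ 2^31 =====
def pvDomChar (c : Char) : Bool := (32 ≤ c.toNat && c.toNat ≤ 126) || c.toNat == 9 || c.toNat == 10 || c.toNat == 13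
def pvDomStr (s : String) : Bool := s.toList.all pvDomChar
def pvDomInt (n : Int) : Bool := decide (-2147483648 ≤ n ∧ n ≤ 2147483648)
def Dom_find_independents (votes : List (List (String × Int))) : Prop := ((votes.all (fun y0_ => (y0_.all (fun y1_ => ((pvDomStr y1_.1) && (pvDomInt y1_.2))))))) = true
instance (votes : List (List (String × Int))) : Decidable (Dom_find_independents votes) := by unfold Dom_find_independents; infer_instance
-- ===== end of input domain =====

-- ===== PORT A =====
-- B changes only the return value computation; neither version mutates its argument.
def find_independents (votes : List (List (String × Int))) : List String :=
  let initial_parties := (PySem.Dict.ofList (votes.headD [])).keys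
  let mc0 := initial_parties.foldl (fun mc p => mc.insert p (0 : Int)) PySem.Dict.empty
  let mc1 := votes.foldl (fun mc c =>
      initial_parties.foldl (fun mc p =>
        if (PySem.Dict.ofList c).getD p 0 < 0 then mc.modify p 0 (· + 1) else mc) mc) mc0
  initial_parties.foldl (fun acc p =>
    if mc1.getD p 0 = (votes.length : Int) - 1 then
      (PySem.List.pyRange 0 (votes.length : Int)).foldl (fun acc i =>
        if 0 ≤ (PySem.Dict.ofList (PySem.List.pyGetD votes i [])).getD p 0 then acc ++ [p] else acc) acc
    else acc) []

-- ===== PORT B =====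
def find_independents_alt (votes : List (List (String × Int))) : List String :=
  let n : Int := votes.length
  (PySem.Dict.ofList (votes.headD [])).keys.foldl (fun acc p =>
    let negatives : Int := votes.countP (fun c => decide ((PySem.Dict.ofList c).getD p 0 < 0))
    if negatives = n - 1 then acc ++ [p] else acc) []

-- ===== PRECONDITION & SPEC =====
-- Pre_ excludes exactly the inputs where the Python raises: an empty votes list (IndexError)
-- and constituencies missing a party of votes[0] (KeyError).
def Pre_find_independents (votes : List (List (String × Int))) : Prop :=
  votes ≠ [] ∧ ∀ c ∈ votes, ∀ p ∈ (PySem.Dict.ofList (votes.headD [])).keys,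
    (PySem.Dict.ofList c).contains p = true
instance (votes : List (List (String × Int))) : Decidable (Pre_find_independents votes) := by
  unfold Pre_find_independents; infer_instance
def pvWitness_find_independents : (List (List (String × Int))) := [[("a", 1), ("b", -2)]]
def Spec_find_independents (votes : List (List (String × Int))) (out : List String) : Prop := out = find_independents_alt votes
instance (votes : List (List (String × Int))) (out : List String) : Decidable (Spec_find_independents votes out) := by unfold Spec_find_independents; infer_instance

-- ===== CLAIM (what is proved, stated in full; the proofs are below) =====
def Claim_equal_find_independents : Prop := ∀ (votes : List (List (String × Int))), Dom_find_independents votes → Pre_find_independents votes → Spec_find_independents votes (find_independents votes)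

-- ===== LEMMAS AND PROOFS =====

-- the count-table loops leave keys not in the party list untouched
theorem inner_getD_of_not_mem (parties : List String) (cond : String → Bool)
    (mc : PySem.Dict String Int) (p : String) (hp : p ∉ parties) :
    (parties.foldl (fun mc q => if cond q then mc.modify q 0 (· + 1) else mc) mc).getD p 0
      = mc.getD p 0 := by
  induction parties generalizing mc with
  | nil => rfl
  | cons q rest ih =>
      simp only [List.foldl_cons]
      have hpq : p ≠ q := fun h => hp (h ▸ List.mem_cons_self)
      have hrest : p ∉ rest := fun h => hp (List.mem_cons_of_mem _ h)
      cases hc : cond q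
      · rw [if_neg Bool.false_ne_true]; exact ih _ hrest
      · rw [if_pos rfl, ih _ hrest, PySem.Dict.getD_modify_of_ne _ _ _ hpq]

-- …and add 1 at each party with a negative value in the current constituency
theorem inner_getD_of_mem (parties : List String) (hnd : parties.Nodup) (cond : String → Bool)
    (mc : PySem.Dict String Int) (p : String) (hp : p ∈ parties) :
    (parties.foldl (fun mc q => if cond q then mc.modify q 0 (· + 1) else mc) mc).getD p 0
      = mc.getD p 0 + (if cond p then 1 else 0) := by
  induction parties generalizing mc with
  | nil => cases hp
  | cons q rest ih =>
      simp only [List.foldl_cons]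
      rcases List.mem_cons.mp hp with rfl | hmem
      · have hnot : p ∉ rest := (List.nodup_cons.mp hnd).1
        cases hc : cond p
        · rw [if_neg Bool.false_ne_true, if_neg Bool.false_ne_true,
            inner_getD_of_not_mem _ _ _ _ hnot]; omega
        · rw [if_pos rfl, if_pos rfl, inner_getD_of_not_mem _ _ _ _ hnot,
            PySem.Dict.getD_modify_self]
      · have hnd' := (List.nodup_cons.mp hnd).2
        have hpq : p ≠ q := fun h => (List.nodup_cons.mp hnd).1 (h ▸ hmem)
        cases hc : cond q
        · rw [if_neg Bool.false_ne_true]; exact ih hnd' _ hmem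
        · rw [if_pos rfl, ih hnd' _ hmem, PySem.Dict.getD_modify_of_ne _ _ _ hpq]

-- the whole count-table phase computes, per party, its number of negative constituencies
theorem outer_count (votes : List (List (String × Int))) (parties : List String)
    (hnd : parties.Nodup) (p : String) (hp : p ∈ parties) (mc : PySem.Dict String Int) :
    (votes.foldl (fun mc c =>
        parties.foldl (fun mc q =>
          if (PySem.Dict.ofList c).getD q 0 < 0 then mc.modify q 0 (· + 1) else mc) mc) mc).getD p 0
      = mc.getD p 0 + (votes.countP (fun c => decide ((PySem.Dict.ofList c).getD p 0 < 0)) : Int) := by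
  induction votes generalizing mc with
  | nil => simp
  | cons c rest ih =>
      simp only [List.foldl_cons, List.countP_cons]
      rw [ih _]
      have h := inner_getD_of_mem parties hnd
        (fun q => decide ((PySem.Dict.ofList c).getD q 0 < 0)) mc p hp
      simp only [decide_eq_true_eq] at h
      rw [h]
      by_cases hc : (PySem.Dict.ofList c).getD p 0 < 0
      · simp only [hc, decide_true]; push_cast; ring
      · simp only [hc, decide_false]; push_cast; ring

-- initialisation leaves every count at the default 0
theorem init_zero (parties : List String) (mc : PySem.Dict String Int) (p : String)
    (h : mc.getD p 0 = 0) :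
    (parties.foldl (fun mc q => mc.insert q (0 : Int)) mc).getD p 0 = 0 := by
  induction parties generalizing mc with
  | nil => exact h
  | cons q rest ih =>
      simp only [List.foldl_cons]
      apply ih
      rw [PySem.Dict.getD_insert]
      split <;> simp [h]

-- A's final inner re-scan appends p once per nonnegative constituency
theorem rescan_eq (votes : List (List (String × Int))) (p : String) (acc : List String) :
    ((PySem.List.pyRange 0 (votes.length : Int)).foldl (fun acc i =>
        if 0 ≤ (PySem.Dict.ofList (PySem.List.pyGetD votes i [])).getD p 0 then acc ++ [p] else acc) acc)
      = acc ++ (votes.filter (fun c => decide (0 ≤ (PySem.Dict.ofList c).getD p 0))).map (fun _ => p) := by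
  rw [PySem.List.foldl_pyRange_zero_pyGetD' votes ([] : List (String × Int))
    (fun acc c => if 0 ≤ (PySem.Dict.ofList c).getD p 0 then acc ++ [p] else acc) acc]
  induction votes generalizing acc with
  | nil => simp
  | cons c rest ih =>
      simp only [List.foldl_cons, List.filter_cons]
      by_cases hc : 0 ≤ (PySem.Dict.ofList c).getD p 0
      · simp [hc, ih]
      · simp [hc, ih]

-- the negative and nonnegative constituencies partition votes
theorem countP_split (votes : List (List (String × Int))) (p : String) :
    votes.countP (fun c => decide (0 ≤ (PySem.Dict.ofList c).getD p 0))
      + votes.countP (fun c => decide ((PySem.Dict.ofList c).getD p 0 < 0)) = votes.length := by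
  induction votes with
  | nil => simp
  | cons c rest ih =>
      simp only [List.countP_cons, List.length_cons]
      by_cases hc : (PySem.Dict.ofList c).getD p 0 < 0
      · rw [decide_eq_true hc, decide_eq_false (not_le.mpr hc)]; simp; omega
      · rw [decide_eq_false hc, decide_eq_true (not_lt.mp hc)]; simp; omega

-- ===== VERDICT (by name: the statement is the Claim_ definition above) =====
theorem find_independents_spec : Claim_equal_find_independents := by
  intro votes _ hpre
  unfold Spec_find_independents find_independents find_independents_alt
  simp only []
  have hnd : (PySem.Dict.ofList (votes.headD [])).keys.Nodup := PySem.Dict.nodup_keys_ofList _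
  set parties := (PySem.Dict.ofList (votes.headD [])).keys with hparties
  have hlen : 1 ≤ votes.length := by
    cases votes with
    | nil => exact absurd rfl hpre.1
    | cons _ _ => simp
  apply Eq.symm
  apply PySem.List.foldl_congr_mem
  intro acc p hp
  have hcount := outer_count votes parties hnd p hp (parties.foldl (fun mc q => mc.insert q (0 : Int)) PySem.Dict.empty)
  rw [init_zero parties _ p (by simp)] at hcount
  rw [hcount, zero_add]
  set neg := votes.countP (fun c => decide ((PySem.Dict.ofList c).getD p 0 < 0)) with hneg
  have hle : neg ≤ votes.length := hneg ▸ List.countP_le_length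
  by_cases hq : (neg : Int) = (votes.length : Int) - 1
  · rw [if_pos hq, if_pos hq, rescan_eq]
    have hsplit := countP_split votes p
    have hone : (votes.filter (fun c => decide (0 ≤ (PySem.Dict.ofList c).getD p 0))).length = 1 := by
      rw [← List.countP_eq_length_filter]; omega
    rw [List.map_const', hone]
    rfl
  · rw [if_neg hq, if_neg hq]
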